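-- pv_equiv track=rewrite | github.com/Revi1337/BaekJoon-Coding-Test | SWEA/D4/4613. 러시아 국기 같은 깃발/러시아 국기 같은 깃발.py | solution
-- ===== SOURCE A (Python) =====
-- def solution(N, M, board):
--     answer = 2500
--     for b in range(1, N - 1):
--         for r in range(b + 1, N):
--             counter = 0
--             white, blue, red = board[:b], board[b:r], board[r:]
--             for row in white:
--                 counter += M - row.count('W')
--             for row in blue:
--                 counter += M - row.count('B')
--             for row in red:
--                 counter += M - row.count('R')
--
--             answer = min(answer, counter)
--
--     return answer
-- ===== SOURCE B (Python) =====
-- def solution(N, M, board):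
--     # Prefix sums of per-row repaint costs make each (b, r) split O(1).
--     pw = [0]
--     pb = [0]
--     pr = [0]
--     for row in board:
--         pw.append(pw[-1] + M - row.count('W'))
--         pb.append(pb[-1] + M - row.count('B'))
--         pr.append(pr[-1] + M - row.count('R'))
--     total_red = pr[-1]
--     answer = 2500
--     for b in range(1, N - 1):
--         for r in range(b + 1, N):
--             answer = min(answer, pw[b] + pb[r] - pb[b] + total_red - pr[r])
--     return answer
-- ===== Notes on version B (the rewrite author's own statement) =====
-- stated objective: faster
-- what changed: B precomputes prefix sums of per-row repaint costs once, making each (b, r) stripe split O(1) instead of rescanning three slices; Pre_ excludes N >= len(board)+2, where A's value comes from Python's silent slice clamping and B's prefix-array indexing raises IndexError.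
-- outside the precondition, e.g. on solution(5, 1, ['W', 'B', 'R']): A returns 0, B raises IndexError
import Mathlib
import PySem

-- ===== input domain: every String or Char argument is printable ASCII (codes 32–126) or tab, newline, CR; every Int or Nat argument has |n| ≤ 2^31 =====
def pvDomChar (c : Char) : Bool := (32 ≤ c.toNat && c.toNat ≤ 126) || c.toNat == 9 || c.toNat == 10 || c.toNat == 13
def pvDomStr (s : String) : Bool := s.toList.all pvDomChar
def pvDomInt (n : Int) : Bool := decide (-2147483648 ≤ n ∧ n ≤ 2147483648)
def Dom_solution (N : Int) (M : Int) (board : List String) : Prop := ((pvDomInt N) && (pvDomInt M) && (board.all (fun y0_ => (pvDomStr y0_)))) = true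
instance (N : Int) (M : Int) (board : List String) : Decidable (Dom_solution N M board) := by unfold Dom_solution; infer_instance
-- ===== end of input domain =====

-- B replaces A's per-split rescans by prefix sums of per-row repaint costs (objective: faster, asymptotic).

-- ===== PORT A =====
def solution (N : Int) (M : Int) (board : List String) : Int :=
  (PySem.List.pyRange 1 (N - 1) 1).foldl (fun answer b =>
    (PySem.List.pyRange (b + 1) N 1).foldl (fun answer r =>
      let white := PySem.List.slice board none (some b)
      let blue  := PySem.List.slice board (some b) (some r)
      let red   := PySem.List.slice board (some r) none
      let c1 := white.foldl (fun c row => c + (M - (PySem.Str.count row "W" : Int))) 0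
      let c2 := blue.foldl  (fun c row => c + (M - (PySem.Str.count row "B" : Int))) c1
      let c3 := red.foldl   (fun c row => c + (M - (PySem.Str.count row "R" : Int))) c2
      min answer c3) answer) 2500

-- ===== PORT B =====
-- one loop iteration building the three prefix-sum lists (pw, pb, pr)
def pvStep (M : Int) (acc : List Int × List Int × List Int) (row : String) :
    List Int × List Int × List Int :=
  (acc.1 ++ [PySem.List.pyGetD acc.1 (-1) 0 + M - (PySem.Str.count row "W" : Int)],
   acc.2.1 ++ [PySem.List.pyGetD acc.2.1 (-1) 0 + M - (PySem.Str.count row "B" : Int)],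
   acc.2.2 ++ [PySem.List.pyGetD acc.2.2 (-1) 0 + M - (PySem.Str.count row "R" : Int)])

def solution_alt (N : Int) (M : Int) (board : List String) : Int :=
  let pre := board.foldl (pvStep M) ([0], [0], [0])
  let pw := pre.1
  let pb := pre.2.1
  let pr := pre.2.2
  let totalRed := PySem.List.pyGetD pr (-1) 0
  (PySem.List.pyRange 1 (N - 1) 1).foldl (fun answer b =>
    (PySem.List.pyRange (b + 1) N 1).foldl (fun answer r =>
      min answer (PySem.List.pyGetD pw b 0 + PySem.List.pyGetD pb r 0
                    - PySem.List.pyGetD pb b 0 + totalRed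
                    - PySem.List.pyGetD pr r 0)) answer) 2500

-- ===== PRECONDITION & SPEC =====
-- Pre_ excludes N ≥ len(board)+2, where A's returned value is an artifact of Python's
-- silent slice clamping and B's prefix-array indexing raises IndexError.
def Pre_solution (N : Int) (M : Int) (board : List String) : Prop :=
  N ≤ (board.length : Int) + 1
instance (N : Int) (M : Int) (board : List String) : Decidable (Pre_solution N M board) := by
  unfold Pre_solution; infer_instance

def pvWitness_solution : Int × Int × List String := (3, 2, ["WW", "BB", "RR"])

def Spec_solution (N : Int) (M : Int) (board : List String) (out : Int) : Prop := out = solution_alt N M board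
instance (N : Int) (M : Int) (board : List String) (out : Int) : Decidable (Spec_solution N M board out) := by unfold Spec_solution; infer_instance

-- ===== CLAIM (what is proved, stated in full; the proofs are below) =====
def Claim_equal_solution : Prop := ∀ (N : Int) (M : Int) (board : List String), Dom_solution N M board → Pre_solution N M board → Spec_solution N M board (solution N M board)

-- ===== LEMMAS AND PROOFS =====

/-- Prefix list of partial sums of `f` over `xs` (length `xs.length + 1`). -/
def pvPrefixes (f : String → Int) (xs : List String) : List Int :=
  (List.range (xs.length + 1)).map (fun k => ((xs.take k).map f).sum)

lemma pvPrefixes_nil (f : String → Int) : pvPrefixes f [] = [0] := by simp [pvPrefixes]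

lemma pvPrefixes_append (f : String → Int) (xs : List String) (y : String) :
    pvPrefixes f (xs ++ [y]) = pvPrefixes f xs ++ [(xs.map f).sum + f y] := by
  unfold pvPrefixes
  rw [show (xs ++ [y]).length + 1 = (xs.length + 1) + 1 by simp]
  rw [List.range_succ, List.map_append]
  congr 1
  · apply List.map_congr_left
    intro k hk
    rw [List.mem_range] at hk
    rw [List.take_append_of_le_length (by omega)]
  · simp [List.take_of_length_le]

lemma pvPrefixes_last (f : String → Int) (xs : List String) :
    PySem.List.pyGetD (pvPrefixes f xs) (-1) 0 = (xs.map f).sum := by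
  have h : pvPrefixes f xs =
      (List.range xs.length).map (fun k => ((xs.take k).map f).sum) ++ [(xs.map f).sum] := by
    unfold pvPrefixes
    rw [List.range_succ, List.map_append]
    simp [List.take_of_length_le]
  rw [h, PySem.List.pyGetD_neg_one_append_singleton]

lemma pvPrefixes_getD (f : String → Int) (xs : List String) (k : Int)
    (h0 : 0 ≤ k) (h1 : k ≤ (xs.length : Int)) :
    PySem.List.pyGetD (pvPrefixes f xs) k 0 = ((xs.take k.toNat).map f).sum := by
  rw [PySem.List.pyGetD_eq_getElem _ _ h0 (by unfold pvPrefixes; simp; omega)]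
  unfold pvPrefixes
  simp [List.getElem_map]

lemma pvPre_eq (M : Int) (board : List String) :
    board.foldl (pvStep M) ([0], [0], [0]) =
      (pvPrefixes (fun row => M - (PySem.Str.count row "W" : Int)) board,
       pvPrefixes (fun row => M - (PySem.Str.count row "B" : Int)) board,
       pvPrefixes (fun row => M - (PySem.Str.count row "R" : Int)) board) := by
  have happ : ∀ (p : List Int) (a b : Int), a = b → p ++ [a] = p ++ [b] := by
    intro p a b h; rw [h]
  induction board using List.reverseRecOn with
  | nil => simp [pvPrefixes_nil]
  | append_singleton xs y ih =>
      rw [List.foldl_append, ih]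
      simp only [List.foldl_cons, List.foldl_nil, pvStep, pvPrefixes_append, pvPrefixes_last,
        Prod.mk.injEq]
      exact ⟨happ _ _ _ (by ring), happ _ _ _ (by ring), happ _ _ _ (by ring)⟩

theorem solution_spec : Claim_equal_solution := by
  intro N M board _ hpre
  unfold Pre_solution at hpre
  unfold Spec_solution solution solution_alt
  rw [pvPre_eq]
  dsimp only
  apply PySem.List.foldl_congr_mem
  intro answer b hb
  rw [PySem.List.mem_pyRange_one] at hb
  apply PySem.List.foldl_congr_mem
  intro ans r hr
  rw [PySem.List.mem_pyRange_one] at hr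
  dsimp only
  rw [pvPrefixes_last]
  have hb0 : (0:Int) ≤ b := by omega
  have hr0 : (0:Int) ≤ r := by omega
  -- rewrite A's slices into take/drop form
  rw [PySem.List.slice_to _ hb0, PySem.List.slice_toNat _ hb0 hr0, PySem.List.slice_from _ hr0]
  rw [PySem.List.foldl_add, PySem.List.foldl_add, PySem.List.foldl_add]
  -- rewrite B's prefix-list lookups into prefix sums
  rw [pvPrefixes_getD _ _ _ hb0 (by omega),
      pvPrefixes_getD _ _ _ hr0 (by omega),
      pvPrefixes_getD _ _ _ hb0 (by omega),
      pvPrefixes_getD _ _ _ hr0 (by omega)]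
  -- sum decompositions
  have e1 :
      ((board.take r.toNat).map (fun row => M - (PySem.Str.count row "B" : Int))).sum =
        ((board.take b.toNat).map (fun row => M - (PySem.Str.count row "B" : Int))).sum +
          (((board.drop b.toNat).take (r.toNat - b.toNat)).map
              (fun row => M - (PySem.Str.count row "B" : Int))).sum := by
    rw [show r.toNat = b.toNat + (r.toNat - b.toNat) by omega, List.take_add]
    simp
  have e2 :
      (board.map (fun row => M - (PySem.Str.count row "R" : Int))).sum =
        ((board.take r.toNat).map (fun row => M - (PySem.Str.count row "R" : Int))).sum +
          ((board.drop r.toNat).map (fun row => M - (PySem.Str.count row "R" : Int))).sum := by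
    conv_lhs => rw [← List.take_append_drop r.toNat board]
    simp
  omega
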